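-- pv_equiv track=rewrite | github.com/BetterThanMoo/TheSortingHat | Diversity.py | get_r
-- ===== SOURCE A (Python) =====
-- def get_r (group_question, num_participants):
--   max_option = 0
--   min_option = 0
--   run = 0
--   run_max = 1
--
--   for i in group_question:
--     run+=1
--     if i > 0:
--       min_option = run
--       break
--
--   for i in group_question:
--     if group_question[-run_max] > 0:
--       max_option = (num_participants - (run_max-1))
--     else:
--       run_max+=1
--   a_range = max_option - min_option
--
--   if a_range - 1 >= 0:
--     return a_range-1
--   else:
--     return 0
-- ===== SOURCE B (Python) =====
-- def get_r(group_question, num_participants):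
--     # Trim non-positive borders; the answer only depends on how much was trimmed.
--     core = list(group_question)
--     while core and core[0] <= 0:
--         core = core[1:]
--     while core and core[-1] <= 0:
--         core = core[:-1]
--     if not core:
--         return 0
--     return max(num_participants - (len(group_question) - len(core)) - 2, 0)
-- ===== Notes on version B (the rewrite author's own statement) =====
-- stated objective: simpler
-- what changed: Instead of locating first/last positive positions and combining min_option/max_option arithmetic, B trims the non-positive borders off the list and computes the answer from the trimmed length alone: max(num_participants - (len - len(core)) - 2, 0).
import Mathlib
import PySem

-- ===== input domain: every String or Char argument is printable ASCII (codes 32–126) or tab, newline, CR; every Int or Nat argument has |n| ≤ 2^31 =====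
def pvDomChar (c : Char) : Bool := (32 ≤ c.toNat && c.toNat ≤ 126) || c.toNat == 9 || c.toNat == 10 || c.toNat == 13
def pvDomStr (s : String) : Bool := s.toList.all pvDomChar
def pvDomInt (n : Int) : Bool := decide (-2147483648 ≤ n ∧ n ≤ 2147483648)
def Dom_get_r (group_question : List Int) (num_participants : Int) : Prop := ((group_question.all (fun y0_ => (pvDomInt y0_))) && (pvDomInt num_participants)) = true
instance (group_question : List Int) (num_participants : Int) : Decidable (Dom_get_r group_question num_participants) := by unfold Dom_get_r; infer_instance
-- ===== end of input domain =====

-- ===== PORT A =====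
-- One honest line: B trims the non-positive borders off the list and computes the answer
-- from the trimmed length alone, replacing A's index scans and min/max-option arithmetic (simpler).

-- A's first loop: run+=1; if i>0: min_option=run; break
def getRMinA : List Int → Int → Int
  | [], _ => 0
  | i :: rest, run => if i > 0 then run + 1 else getRMinA rest (run + 1)

def get_r (group_question : List Int) (num_participants : Int) : Int :=
  let min_option := getRMinA group_question 0
  -- A's second loop iterates once per element, ignoring it; index -run_max is
  -- always in range while it is read (pyGetD's default is never used).
  let st := group_question.foldl
    (fun (st : Int × Int) (_ : Int) =>
      if PySem.List.pyGetD group_question (-(st.2)) 0 > 0 then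
        (num_participants - (st.2 - 1), st.2)
      else
        (st.1, st.2 + 1)) (0, 1)
  let a_range := st.1 - min_option
  if a_range - 1 ≥ 0 then a_range - 1 else 0

-- ===== PORT B =====
-- Source B's first while loop: while core and core[0] <= 0: core = core[1:]
def trimFront : List Int → List Int
  | [] => []
  | x :: t => if x ≤ 0 then trimFront t else x :: t

-- Source B's second while loop: while core and core[-1] <= 0: core = core[:-1]
-- core[-1] on a non-empty list is exact via PySem.List.pyGetD (the default is never used).
def trimBack : List Int → List Int
  | [] => []
  | x :: t =>
    if PySem.List.pyGetD (x :: t) (-1) 0 ≤ 0 then trimBack (x :: t).dropLast else x :: t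
termination_by l => l.length
decreasing_by simp

def get_r_alt (group_question : List Int) (num_participants : Int) : Int :=
  let core := trimBack (trimFront group_question)
  if core = [] then 0
  else max (num_participants - ((group_question.length : Int) - core.length) - 2) 0

-- ===== PRECONDITION & SPEC =====
def Spec_get_r (group_question : List Int) (num_participants : Int) (out : Int) : Prop := out = get_r_alt group_question num_participants
instance (group_question : List Int) (num_participants : Int) (out : Int) : Decidable (Spec_get_r group_question num_participants out) := by unfold Spec_get_r; infer_instance

-- ===== CLAIM (what is proved, stated in full; the proofs are below) =====
def Claim_equal_get_r : Prop := ∀ (group_question : List Int) (num_participants : Int), Dom_get_r group_question num_participants → Spec_get_r group_question num_participants (get_r group_question num_participants)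

-- ===== LEMMAS AND PROOFS =====

-- A's first loop returns (first positive index)+1, offset by the initial run value.
theorem getRMinA_eq (xs : List Int) (run : Int) :
    getRMinA xs run = (match xs.findIdx? (fun v => 0 < v) with
      | some j => run + (j : Int) + 1
      | none => 0) := by
  induction xs generalizing run with
  | nil => simp [getRMinA]
  | cons x t ih =>
    simp only [getRMinA, List.findIdx?_cons]
    by_cases hx : 0 < x
    · simp [hx]
    · simp only [hx, decide_false, ih (run + 1)]
      cases h : t.findIdx? (fun v => 0 < v) with
      | none => simp
      | some j => simp; ring

-- A's second loop: the first component of the fold state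
theorem loop2_eq (xs : List Int) (np : Int) (ys : List Int) (m : Nat) (mo : Int)
    (hm : m + ys.length ≤ xs.length) :
    (ys.foldl (fun (st : Int × Int) (_ : Int) =>
        if PySem.List.pyGetD xs (-(st.2)) 0 > 0 then (np - (st.2 - 1), st.2)
        else (st.1, st.2 + 1)) (mo, (m : Int) + 1)).1
      = (match ((xs.reverse.drop m).take ys.length).findIdx? (fun v => 0 < v) with
        | some j => np - ((m + j : Nat) : Int)
        | none => mo) := by
  induction ys generalizing m mo with
  | nil => simp
  | cons y t ih =>
    have hm1 : m < xs.length := by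
      simp only [List.length_cons] at hm; omega
    have hmr : m < xs.reverse.length := by simpa using hm1
    have hcast : -((m : Int) + 1) = -(((m + 1 : Nat) : Int)) := by push_cast; ring
    have hget : PySem.List.pyGetD xs (-((m : Int) + 1)) 0 = xs.reverse[m] := by
      rw [hcast, PySem.List.pyGetD_neg_natCast xs (m + 1) 0 (by omega) (by omega),
        List.getElem_reverse]
      congr 1; omega
    have hdrop : xs.reverse.drop m = xs.reverse[m] :: xs.reverse.drop (m + 1) :=
      List.drop_eq_getElem_cons hmr
    simp only [List.foldl_cons, hget]
    by_cases hpos : xs.reverse[m] > 0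
    · simp only [hpos, if_pos]
      have hstep : np - ((m : Int) + 1 - 1) = np - (m : Int) := by ring
      rw [hstep, ih m (np - (m : Int)) (by simp only [List.length_cons] at hm; omega)]
      rw [hdrop]
      have hpos' : 0 < xs[xs.length - 1 - m]'(by omega) := by
        rw [← List.getElem_reverse hmr]; exact hpos
      cases t with
      | nil => simp [hpos']
      | cons a t' => simp [List.take_succ_cons, List.findIdx?_cons, hpos']
    · simp only [hpos, if_neg, not_false_eq_true]
      have hstep : ((m : Int) + 1) + 1 = ((m + 1 : Nat) : Int) + 1 := by push_cast; ring
      rw [hstep, ih (m + 1) mo (by simp only [List.length_cons] at hm; omega)]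
      rw [hdrop]
      simp only [List.length_cons, List.take_succ_cons, List.findIdx?_cons]
      have hpos' : ¬ (0 < xs[xs.length - 1 - m]'(by omega)) := by
        rw [← List.getElem_reverse hmr]; omega
      simp only [List.getElem_reverse, hpos', decide_false, Bool.false_eq_true, if_neg,
        not_false_eq_true]
      cases ((xs.reverse.drop (m + 1)).take t.length).findIdx? (fun v => 0 < v) with
      | none => simp
      | some j => simp only [Option.map_some]; congr 1; omega

-- trimFront drops exactly the leading non-positives: it is `drop (findIdx (0 < ·))`.
theorem trimFront_eq_drop (xs : List Int) :
    trimFront xs = xs.drop (xs.findIdx (fun v => 0 < v)) := by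
  induction xs with
  | nil => rfl
  | cons x t ih =>
    by_cases hx : 0 < x
    · simp [trimFront, List.findIdx_cons, hx, not_le.mpr hx]
    · simp [trimFront, List.findIdx_cons, hx, not_lt.mp hx, ih]

theorem trimBack_nil : trimBack [] = [] := by
  simp [trimBack]

theorem trimBack_concat (ys : List Int) (y : Int) :
    trimBack (ys ++ [y]) = if y ≤ 0 then trimBack ys else ys ++ [y] := by
  obtain ⟨a, t, hat⟩ := List.exists_cons_of_ne_nil (show ys ++ [y] ≠ [] by simp)
  rw [hat, trimBack, ← hat, PySem.List.pyGetD_neg_one_append_singleton, List.dropLast_concat]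

-- trimBack is trimFront through reversal.
theorem trimBack_eq_reverse (l : List Int) :
    trimBack l = (trimFront l.reverse).reverse := by
  induction l using List.reverseRecOn with
  | nil => simp [trimBack_nil, trimFront]
  | append_singleton ys y ih =>
    rw [trimBack_concat]
    simp only [List.reverse_append, List.reverse_cons, List.reverse_nil, List.nil_append,
      List.singleton_append]
    by_cases hy : y ≤ 0
    · simp [hy, trimFront, ih]
    · simp [hy, trimFront]

-- a list with no positive element is trimmed to nothing
theorem trimFront_eq_nil : ∀ xs : List Int, (∀ v ∈ xs, v ≤ 0) → trimFront xs = []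
  | [], _ => rfl
  | x :: t, h => by
    simp [trimFront, h x (by simp), trimFront_eq_nil t (fun v hv => h v (by simp [hv]))]

-- findIdx? is unchanged by `take k` when the hit is before k.
theorem findIdx?_take {α : Type} (q : α → Bool) (l : List α) (j k : Nat)
    (h : l.findIdx? q = some j) (hk : j < k) :
    (l.take k).findIdx? q = some j := by
  induction l generalizing j k with
  | nil => simp at h
  | cons x t ih =>
    cases k with
    | zero => omega
    | succ k' =>
      simp only [List.take_succ_cons, List.findIdx?_cons] at *
      by_cases hx : q x
      · simpa [hx] using h
      · simp only [hx, Bool.false_eq_true, if_neg, not_false_eq_true] at h ⊢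
        cases hj : t.findIdx? q with
        | none => rw [hj] at h; simp at h
        | some j' =>
          rw [hj] at h
          simp only [Option.map_some, Option.some.injEq] at h
          rw [ih j' k' hj (by omega)]
          simp [h]

-- ===== VERDICT (by name: the statement is the Claim_ definition above) =====
theorem get_r_spec : Claim_equal_get_r := by
  intro xs np _
  unfold Spec_get_r
  show get_r xs np = get_r_alt xs np
  have hfold := loop2_eq xs np xs 0 0 (by simp)
  have htake : (xs.reverse.drop 0).take xs.length = xs.reverse := by simp
  rw [htake] at hfold
  norm_num at hfold
  cases h1 : xs.findIdx? (fun v => 0 < v) with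
  | none =>
    have h2 : xs.reverse.findIdx? (fun v => 0 < v) = none := by
      rw [List.findIdx?_eq_none_iff] at h1 ⊢
      intro x hx; exact h1 x (List.mem_reverse.mp hx)
    have hmin : getRMinA xs 0 = 0 := by rw [getRMinA_eq, h1]
    rw [h2] at hfold
    have hall : ∀ v ∈ xs, v ≤ 0 := by
      rw [List.findIdx?_eq_none_iff] at h1
      intro v hv
      have := h1 v hv
      simp at this
      omega
    have hTF : trimFront xs = [] := trimFront_eq_nil xs hall
    simp only [get_r, get_r_alt, hmin, hTF, trimBack_nil]
    rw [hfold]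
    norm_num
  | some j =>
    obtain ⟨hjlt, hpj, hjmin⟩ := List.findIdx?_eq_some_iff_getElem.mp h1
    have h2 : ∃ j', xs.reverse.findIdx? (fun v => 0 < v) = some j' := by
      cases h : xs.reverse.findIdx? (fun v => 0 < v) with
      | some j' => exact ⟨j', rfl⟩
      | none =>
        rw [List.findIdx?_eq_none_iff] at h
        have := h xs[j] (List.mem_reverse.mpr (xs.getElem_mem hjlt))
        simp_all
    obtain ⟨j', h2⟩ := h2
    obtain ⟨hj'lt, hpj', hj'min⟩ := List.findIdx?_eq_some_iff_getElem.mp h2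
    have hj'len : j' < xs.length := by simpa using hj'lt
    -- the last positive is not before the first one: j' + j + 1 ≤ n
    have hj'le : j' + j + 1 ≤ xs.length := by
      by_contra hcon
      have hm : xs.length - 1 - j < j' := by omega
      have h3 := hj'min (xs.length - 1 - j) hm
      rw [List.getElem_reverse] at h3
      have heq : xs.length - 1 - (xs.length - 1 - j) = j := by omega
      simp only [heq] at h3
      simp_all
    have hidx : xs.findIdx (fun v => 0 < v) = j :=
      (List.findIdx?_eq_some_iff_findIdx_eq.mp h1).2
    rw [h2] at hfold
    norm_num at hfold
    have hmin := getRMinA_eq xs 0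
    rw [h1] at hmin
    norm_num at hmin
    -- B side: reverse of the dropped list is a take of the reverse
    have hrev : (xs.drop j).reverse = xs.reverse.take (xs.length - j) := by
      rw [List.reverse_drop]
    have hfi : ((xs.drop j).reverse).findIdx? (fun v => 0 < v) = some j' := by
      rw [hrev]; exact findIdx?_take _ _ j' (xs.length - j) h2 (by omega)
    have hidx2 : ((xs.drop j).reverse).findIdx (fun v => 0 < v) = j' :=
      (List.findIdx?_eq_some_iff_findIdx_eq.mp hfi).2
    simp only [get_r, get_r_alt, trimBack_eq_reverse, trimFront_eq_drop]
    rw [hfold, hmin, hidx, hidx2]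
    have hlen : (((xs.drop j).reverse).drop j').length = xs.length - j - j' := by
      simp
    have hne : (((xs.drop j).reverse).drop j').reverse ≠ [] := by
      intro hcon
      have : (((xs.drop j).reverse).drop j').length = 0 := by
        rw [← List.length_reverse, hcon]; rfl
      omega
    rw [if_neg hne]
    have hlen2 : ((((xs.drop j).reverse).drop j').reverse.length : Int)
        = (xs.length : Int) - j - j' := by
      rw [List.length_reverse, hlen]; omega
    rw [hlen2, Int.max_def]
    split_ifs <;> linarith
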